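-- pv_equiv track=rewrite | github.com/arm07/CS-581 | RideShare.py | carassignment
-- ===== SOURCE A (Python) =====
-- def carassignment(clusterpt, kvalue):
--       carassign = []
--       carcount = -1
--       for i in range(0, kvalue):
--           for j in range(0, len(clusterpt[i])):
--               if (j % 4 == 0):
--                   carassign.append([])
--                   carcount = carcount + 1
--                   carassign[carcount].append(clusterpt[i][j])
--               else:
--                   carassign[carcount].append(clusterpt[i][j])
--       return carassign, carcount + 1
-- ===== SOURCE B (Python) =====
-- def carassignment(clusterpt, kvalue):
--     carassign = []
--     for i in range(kvalue):
--         cluster = clusterpt[i]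
--         for k in range(0, len(cluster), 4):
--             carassign.append(cluster[k:k+4])
--     return carassign, len(carassign)
-- ===== Notes on version B (the rewrite author's own statement) =====
-- stated objective: simpler
-- what changed: Replaces the per-element loop with its modulo test and running carcount index by slicing each cluster into size-4 chunks at chunk boundaries (range step 4) and returning len(carassign) directly.
import Mathlib
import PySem

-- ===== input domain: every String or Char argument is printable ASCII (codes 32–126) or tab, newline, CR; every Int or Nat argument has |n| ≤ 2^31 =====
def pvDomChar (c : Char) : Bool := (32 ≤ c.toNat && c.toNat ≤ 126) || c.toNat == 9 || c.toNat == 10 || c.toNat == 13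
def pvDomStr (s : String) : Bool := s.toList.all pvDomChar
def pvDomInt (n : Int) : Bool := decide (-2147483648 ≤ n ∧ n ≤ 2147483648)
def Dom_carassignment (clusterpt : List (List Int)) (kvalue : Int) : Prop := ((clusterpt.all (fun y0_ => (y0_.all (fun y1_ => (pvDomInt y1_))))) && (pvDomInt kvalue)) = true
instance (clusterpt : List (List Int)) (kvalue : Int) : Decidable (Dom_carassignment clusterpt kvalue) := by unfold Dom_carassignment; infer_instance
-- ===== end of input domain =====

-- B slices each cluster into size-4 chunks at chunk boundaries (range step 4) instead of A's
-- per-element loop with a modulo test and a running car index; objective: simpler.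

-- ===== PORT A =====
def carassignment (clusterpt : List (List Int)) (kvalue : Int) : List (List Int) × Int :=
  let r := (PySem.List.pyRange 0 kvalue 1).foldl (fun st i =>
    let cluster := PySem.List.pyGetD clusterpt i []
    (PySem.List.pyRange 0 (cluster.length : Int) 1).foldl (fun st j =>
      let x := PySem.List.pyGetD cluster j 0
      if PySem.Int.mod j 4 == 0 then
        let ca := st.1 ++ [([] : List Int)]
        let cc := st.2 + 1
        (ca.set cc.toNat (ca.getD cc.toNat [] ++ [x]), cc)
      else
        (st.1.set st.2.toNat (st.1.getD st.2.toNat [] ++ [x]), st.2)) st) ([], -1)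
  (r.1, r.2 + 1)

-- ===== PORT B =====
def carassignment_alt (clusterpt : List (List Int)) (kvalue : Int) : List (List Int) × Int :=
  let carassign := (PySem.List.pyRange 0 kvalue 1).foldl (fun acc i =>
    let cluster := PySem.List.pyGetD clusterpt i []
    (PySem.List.pyRange 0 (cluster.length : Int) 4).foldl
      (fun acc k => acc ++ [PySem.List.slice cluster (some k) (some (k + 4))]) acc) []
  (carassign, (carassign.length : Int))

-- ===== PRECONDITION & SPEC =====
-- A (and B) raise IndexError via clusterpt[i] when kvalue exceeds len(clusterpt); Pre_ excludes exactly that.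
def Pre_carassignment (clusterpt : List (List Int)) (kvalue : Int) : Prop :=
  kvalue ≤ (clusterpt.length : Int)
instance (clusterpt : List (List Int)) (kvalue : Int) : Decidable (Pre_carassignment clusterpt kvalue) := by unfold Pre_carassignment; infer_instance
def pvWitness_carassignment : List (List Int) × Int := ([[1, 2, 3, 4, 5], [7]], 2)

def Spec_carassignment (clusterpt : List (List Int)) (kvalue : Int) (out : List (List Int) × Int) : Prop := out = carassignment_alt clusterpt kvalue
instance (clusterpt : List (List Int)) (kvalue : Int) (out : List (List Int) × Int) : Decidable (Spec_carassignment clusterpt kvalue out) := by unfold Spec_carassignment; infer_instance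

-- ===== CLAIM (what is proved, stated in full; the proofs are below) =====
def Claim_equal_carassignment : Prop := ∀ (clusterpt : List (List Int)) (kvalue : Int), Dom_carassignment clusterpt kvalue → Pre_carassignment clusterpt kvalue → Spec_carassignment clusterpt kvalue (carassignment clusterpt kvalue)

-- ===== LEMMAS AND PROOFS =====

def groups4 (l : List Int) : List (List Int) :=
  if h : l = [] then [] else l.take 4 :: groups4 (l.drop 4)
termination_by l.length
decreasing_by cases l with
  | nil => exact absurd rfl h
  | cons a t => simp

theorem pyRange_shift (a b s t : Int) :
    PySem.List.pyRange (a + t) (b + t) s = (PySem.List.pyRange a b s).map (fun x => t + x) := by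
  simp only [PySem.List.pyRange]
  by_cases hs : s = 0
  · simp [hs]
  · rw [show b + t - (a + t) = b - a by ring, show a + t - (b + t) = a - b by ring]
    simp only [hs, if_false, add_lt_add_iff_right, List.map_map]
    congr 1
    funext k
    simp [Function.comp]
    ring

theorem pyRange_pos_cons (a b s : Int) (hs : 0 < s) (h : a < b) :
    PySem.List.pyRange a b s = a :: PySem.List.pyRange (a + s) b s := by
  rw [PySem.List.pyRange_of_pos _ _ hs, PySem.List.pyRange_of_pos _ _ hs]
  by_cases h2 : a + s < b
  · have e1 : b - a + s - 1 = (b - (a + s) + s - 1) + 1 * s := by ring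
    have e2 : (b - a + s - 1) / s = (b - (a + s) + s - 1) / s + 1 := by
      rw [e1, Int.add_mul_ediv_right _ _ (by omega)]
    have hnn : 0 ≤ (b - (a + s) + s - 1) / s := Int.ediv_nonneg (by omega) (by omega)
    rw [if_pos h, if_pos h2, e2]
    have : ((b - (a + s) + s - 1) / s + 1).toNat = ((b - (a + s) + s - 1) / s).toNat + 1 := by omega
    rw [this, List.range_succ_eq_map]
    simp only [List.map_cons, List.map_map]
    congr 1
    · simp
    · congr 1
      funext k
      simp [Function.comp]
      ring
  · have e : (b - a + s - 1) / s = 1 := by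
      have : b - a + s - 1 = (b - a - 1) + 1 * s := by ring
      rw [this, Int.add_mul_ediv_right _ _ (by omega), Int.ediv_eq_zero_of_lt (by omega) (by omega)]
      norm_num
    rw [if_pos h, if_neg (by omega), e]
    simp

theorem innerB (cluster : List Int) (acc : List (List Int)) :
    (PySem.List.pyRange 0 (cluster.length : Int) 4).foldl
      (fun acc k => acc ++ [PySem.List.slice cluster (some k) (some (k + 4))]) acc
    = acc ++ groups4 cluster := by
  by_cases h0 : cluster = []
  · subst h0
    simp [PySem.List.pyRange, groups4]
  · have hlen : 0 < cluster.length := List.length_pos_iff.mpr h0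
    rw [pyRange_pos_cons 0 _ 4 (by omega) (by exact_mod_cast hlen)]
    simp only [List.foldl_cons]
    have hs0 : PySem.List.slice cluster (some 0) (some (0 + 4)) = cluster.take 4 := by
      rw [PySem.List.slice_toNat cluster (by omega) (by omega)]
      simp
    rw [hs0]
    have hshift : PySem.List.pyRange (0 + 4) ((cluster.length : Int)) 4
        = (PySem.List.pyRange 0 ((cluster.length : Int) - 4) 4).map (fun x => 4 + x) := by
      have := pyRange_shift 0 ((cluster.length : Int) - 4) 4 4
      simpa using this
    rw [hshift, List.foldl_map]
    have hbody : ∀ (acc2 : List (List Int)), ∀ k ∈ PySem.List.pyRange 0 ((cluster.length : Int) - 4) 4,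
        acc2 ++ [PySem.List.slice cluster (some (4 + k)) (some (4 + k + 4))]
        = acc2 ++ [PySem.List.slice (cluster.drop 4) (some k) (some (k + 4))] := by
      intro acc2 k hk
      have hk0 : 0 ≤ k := ((PySem.List.mem_pyRange_iff_of_pos (by omega) k).mp hk).1
      rw [PySem.List.slice_toNat cluster (by omega) (by omega),
          PySem.List.slice_toNat (cluster.drop 4) hk0 (by omega)]
      have e1 : (4 + k + 4).toNat - (4 + k).toNat = 4 := by omega
      have e2 : (k + 4).toNat - k.toNat = 4 := by omega
      have e3 : (4 + k).toNat = 4 + k.toNat := by omega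
      rw [e1, e2, List.drop_drop, e3]
    rw [PySem.List.foldl_congr_mem _ _ _ _ hbody]
    by_cases hsmall : cluster.length ≤ 4
    · have hnil : PySem.List.pyRange 0 ((cluster.length : Int) - 4) 4 = [] := by
        rw [PySem.List.pyRange_of_pos _ _ (by omega : (0:Int) < 4), if_neg (by omega)]
        simp
      have hdnil : cluster.drop 4 = [] := List.drop_eq_nil_of_le hsmall
      rw [hnil]
      simp only [List.foldl_nil]
      rw [groups4]
      simp [h0, hdnil, groups4]
    · have hcast : ((cluster.drop 4).length : Int) = (cluster.length : Int) - 4 := by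
        simp [List.length_drop]
        omega
      rw [← hcast, innerB (cluster.drop 4) (acc ++ [cluster.take 4])]
      conv_rhs => rw [groups4]
      simp [h0]
termination_by cluster.length
decreasing_by simp [List.length_drop]; omega

theorem set_append_last {α : Type} (acc : List α) (w v : α) :
    (acc ++ [w]).set acc.length v = acc ++ [v] := by
  induction acc with
  | nil => simp
  | cons x xs ih => simpa using ih

theorem getD_append_last {α : Type} (acc : List α) (w d : α) :
    (acc ++ [w]).getD acc.length d = w := by
  induction acc with
  | nil => simp
  | cons x xs ih => simpa using ih

theorem mod4_small (b : Int) (h : 0 ≤ b) (h2 : b < 4) : PySem.Int.mod b 4 = b := by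
  simp [PySem.Int.mod, Int.fmod_eq_emod]
  omega

theorem elseRunA (cluster : List Int) (acc : List (List Int)) :
    ∀ (b a : Nat) (q : List Int), 1 ≤ a → a ≤ b → b ≤ 4 → b ≤ cluster.length →
    (PySem.List.pyRange (a : Int) (b : Int) 1).foldl (fun st j =>
      if PySem.Int.mod j 4 == 0 then
        ((st.1 ++ [([] : List Int)]).set (st.2 + 1).toNat
          ((st.1 ++ [([] : List Int)]).getD (st.2 + 1).toNat [] ++ [PySem.List.pyGetD cluster j 0]), st.2 + 1)
      else
        (st.1.set st.2.toNat (st.1.getD st.2.toNat [] ++ [PySem.List.pyGetD cluster j 0]), st.2))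
      (acc ++ [q], (acc.length : Int))
    = (acc ++ [q ++ (cluster.drop a).take (b - a)], (acc.length : Int)) := by
  intro b
  induction b with
  | zero => intro a q h1 h2 h3 h4; omega
  | succ b ih =>
    intro a q h1 h2 h3 h4
    by_cases hab : a = b + 1
    · subst hab
      rw [PySem.List.pyRange_one_eq_nil (by omega)]
      simp
    · have hab' : a ≤ b := by omega
      have hcast : ((b + 1 : Nat) : Int) = (b : Int) + 1 := by push_cast; ring
      rw [hcast, PySem.List.pyRange_one_succ_right (by exact_mod_cast hab'), List.foldl_append,
          ih a q h1 hab' (by omega) (by omega)]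
      simp only [List.foldl_cons, List.foldl_nil]
      have hne : ((PySem.Int.mod (b : Int) 4 == 0) = false) := by
        rw [mod4_small _ (by omega) (by exact_mod_cast (by omega : b < 4))]
        simp
        omega
      simp only [hne, Bool.false_eq_true, if_false]
      simp only [Int.toNat_natCast, set_append_last, getD_append_last]
      have hx : PySem.List.pyGetD cluster (b : Int) 0 = cluster.getD b 0 :=
        PySem.List.pyGetD_natCast cluster b 0
      rw [hx]
      have hlist : (q ++ (cluster.drop a).take (b - a)) ++ [cluster.getD b 0]
          = q ++ (cluster.drop a).take (b + 1 - a) := by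
        rw [List.append_assoc]
        congr 1
        have e : b + 1 - a = (b - a) + 1 := by omega
        rw [e, List.take_succ]
        congr 1
        rw [List.getElem?_drop]
        have hba : a + (b - a) = b := by omega
        rw [hba, List.getD_eq_getElem?_getD]
        have hb : b < cluster.length := by omega
        simp [List.getElem?_eq_getElem hb]
      rw [hlist]

theorem firstChunkA (cluster : List Int) (acc : List (List Int)) (m : Nat)
    (h1 : 1 ≤ m) (h4 : m ≤ 4) (hlen : m ≤ cluster.length) :
    (PySem.List.pyRange 0 (m : Int) 1).foldl (fun st j =>
      if PySem.Int.mod j 4 == 0 then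
        ((st.1 ++ [([] : List Int)]).set (st.2 + 1).toNat
          ((st.1 ++ [([] : List Int)]).getD (st.2 + 1).toNat [] ++ [PySem.List.pyGetD cluster j 0]), st.2 + 1)
      else
        (st.1.set st.2.toNat (st.1.getD st.2.toNat [] ++ [PySem.List.pyGetD cluster j 0]), st.2))
      (acc, (acc.length : Int) - 1)
    = (acc ++ [cluster.take m], (acc.length : Int)) := by
  rw [PySem.List.pyRange_one_cons (by exact_mod_cast h1)]
  simp only [List.foldl_cons]
  have hm0 : ((PySem.Int.mod (0 : Int) 4 == 0) = true) := by decide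
  simp only [hm0, if_true]
  have e1 : (acc.length : Int) - 1 + 1 = (acc.length : Int) := by ring
  rw [e1]
  simp only [Int.toNat_natCast, set_append_last, getD_append_last, List.nil_append]
  have hrun := elseRunA cluster acc m 1 [PySem.List.pyGetD cluster 0 0] (by omega) h1 h4 (by omega)
  rw [show ((0:Int) + 1 = ((1:Nat) : Int)) by norm_num, hrun]
  congr 3
  cases cluster with
  | nil => simp at hlen; omega
  | cons c t =>
    have e : m = (m - 1) + 1 := by omega
    rw [e]
    simp [PySem.List.pyGetD, PySem.List.pyIdx?]

theorem innerA (cluster : List Int) (acc : List (List Int)) :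
    (PySem.List.pyRange 0 (cluster.length : Int) 1).foldl (fun st j =>
      if PySem.Int.mod j 4 == 0 then
        ((st.1 ++ [([] : List Int)]).set (st.2 + 1).toNat
          ((st.1 ++ [([] : List Int)]).getD (st.2 + 1).toNat [] ++ [PySem.List.pyGetD cluster j 0]), st.2 + 1)
      else
        (st.1.set st.2.toNat (st.1.getD st.2.toNat [] ++ [PySem.List.pyGetD cluster j 0]), st.2))
      (acc, (acc.length : Int) - 1)
    = (acc ++ groups4 cluster, ((acc ++ groups4 cluster).length : Int) - 1) := by
  by_cases h0 : cluster = []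
  · subst h0
    simp [PySem.List.pyRange, groups4]
  · have hlen : 0 < cluster.length := List.length_pos_iff.mpr h0
    by_cases hsmall : cluster.length ≤ 4
    · rw [firstChunkA cluster acc cluster.length (by omega) hsmall (le_refl _)]
      have hg : groups4 cluster = [cluster] := by
        rw [groups4]
        simp [h0, List.drop_eq_nil_of_le hsmall, groups4, List.take_of_length_le (by omega : cluster.length ≤ 4)]
      rw [hg]
      simp
    · -- split the range at 4
      rw [PySem.List.pyRange_one_append 0 4 (cluster.length : Int) (by omega) (by exact_mod_cast (by omega : 4 ≤ cluster.length)),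
          List.foldl_append]
      have hfc := firstChunkA cluster acc 4 (by omega) (le_refl _) (by omega)
      rw [show (((4:Nat) : Int) = (4:Int)) by norm_num] at hfc
      rw [hfc]
      have hshift : PySem.List.pyRange (4 : Int) ((cluster.length : Int)) 1
          = (PySem.List.pyRange 0 ((cluster.length : Int) - 4) 1).map (fun x => 4 + x) := by
        have h := pyRange_shift 0 ((cluster.length : Int) - 4) 1 4
        simpa using h
      rw [hshift, List.foldl_map]
      have hbody : ∀ (st : List (List Int) × Int), ∀ k ∈ PySem.List.pyRange 0 ((cluster.length : Int) - 4) 1,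
          (fun st (j : Int) =>
            if PySem.Int.mod j 4 == 0 then
              ((st.1 ++ [([] : List Int)]).set (st.2 + 1).toNat
                ((st.1 ++ [([] : List Int)]).getD (st.2 + 1).toNat [] ++ [PySem.List.pyGetD cluster j 0]), st.2 + 1)
            else
              (st.1.set st.2.toNat (st.1.getD st.2.toNat [] ++ [PySem.List.pyGetD cluster j 0]), st.2)) st (4 + k)
          = (fun st (j : Int) =>
            if PySem.Int.mod j 4 == 0 then
              ((st.1 ++ [([] : List Int)]).set (st.2 + 1).toNat
                ((st.1 ++ [([] : List Int)]).getD (st.2 + 1).toNat [] ++ [PySem.List.pyGetD (cluster.drop 4) j 0]), st.2 + 1)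
            else
              (st.1.set st.2.toNat (st.1.getD st.2.toNat [] ++ [PySem.List.pyGetD (cluster.drop 4) j 0]), st.2)) st k := by
        intro st k hk
        have hk0 : 0 ≤ k := by
          have := PySem.List.mem_pyRange_one.mp hk
          omega
        have hmod : PySem.Int.mod (4 + k) 4 = PySem.Int.mod k 4 := by
          simp [PySem.Int.mod, Int.fmod_eq_emod]
        have hget : PySem.List.pyGetD cluster (4 + k) 0 = PySem.List.pyGetD (cluster.drop 4) k 0 := by
          rw [PySem.List.pyGetD_of_nonneg cluster 0 (by omega),
              PySem.List.pyGetD_of_nonneg (cluster.drop 4) 0 hk0,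
              List.getD_eq_getElem?_getD, List.getD_eq_getElem?_getD, List.getElem?_drop]
          congr 2
          omega
        simp only [hmod, hget]
      rw [PySem.List.foldl_congr_mem _ _ _ _ hbody]
      have hcast : ((cluster.drop 4).length : Int) = (cluster.length : Int) - 4 := by
        simp [List.length_drop]
        omega
      have hacc : ((acc ++ [cluster.take 4]).length : Int) - 1 = (acc.length : Int) := by
        simp
      rw [← hcast, ← hacc, innerA (cluster.drop 4) (acc ++ [cluster.take 4])]
      conv_rhs => rw [groups4]
      simp [h0]
termination_by cluster.length
decreasing_by simp [List.length_drop]; omega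

def carsOf (clusterpt : List (List Int)) (m : Nat) : List (List Int) :=
  ((clusterpt.take m).map groups4).flatten

theorem carsOf_succ (clusterpt : List (List Int)) (m : Nat) (h : m < clusterpt.length) :
    carsOf clusterpt (m + 1) = carsOf clusterpt m ++ groups4 (clusterpt.getD m []) := by
  unfold carsOf
  rw [List.take_succ, List.getElem?_eq_getElem h, List.map_append, List.flatten_append]
  rw [List.getD_eq_getElem?_getD, List.getElem?_eq_getElem h]
  simp

theorem outerA (clusterpt : List (List Int)) :
    ∀ (m : Nat) (acc : List (List Int)), m ≤ clusterpt.length →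
    (PySem.List.pyRange 0 (m : Int) 1).foldl (fun st i =>
      (PySem.List.pyRange 0 (((PySem.List.pyGetD clusterpt i []).length : Nat) : Int) 1).foldl (fun st j =>
        if PySem.Int.mod j 4 == 0 then
          ((st.1 ++ [([] : List Int)]).set (st.2 + 1).toNat
            ((st.1 ++ [([] : List Int)]).getD (st.2 + 1).toNat [] ++ [PySem.List.pyGetD (PySem.List.pyGetD clusterpt i []) j 0]), st.2 + 1)
        else
          (st.1.set st.2.toNat (st.1.getD st.2.toNat [] ++ [PySem.List.pyGetD (PySem.List.pyGetD clusterpt i []) j 0]), st.2)) st)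
      (acc, (acc.length : Int) - 1)
    = (acc ++ carsOf clusterpt m, ((acc ++ carsOf clusterpt m).length : Int) - 1) := by
  intro m
  induction m with
  | zero =>
    intro acc h
    rw [PySem.List.pyRange_one_eq_nil (by norm_num)]
    simp [carsOf]
  | succ m ih =>
    intro acc h
    have hcast : ((m + 1 : Nat) : Int) = (m : Int) + 1 := by push_cast; ring
    rw [hcast, PySem.List.pyRange_one_succ_right (by positivity), List.foldl_append,
        ih acc (by omega)]
    simp only [List.foldl_cons, List.foldl_nil]
    rw [PySem.List.pyGetD_natCast clusterpt m []]
    rw [innerA (clusterpt.getD m []) (acc ++ carsOf clusterpt m)]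
    rw [carsOf_succ clusterpt m (by omega)]
    simp

theorem outerB (clusterpt : List (List Int)) :
    ∀ (m : Nat) (acc : List (List Int)), m ≤ clusterpt.length →
    (PySem.List.pyRange 0 (m : Int) 1).foldl (fun acc i =>
      (PySem.List.pyRange 0 (((PySem.List.pyGetD clusterpt i []).length : Nat) : Int) 4).foldl
        (fun acc k => acc ++ [PySem.List.slice (PySem.List.pyGetD clusterpt i []) (some k) (some (k + 4))]) acc)
      acc
    = acc ++ carsOf clusterpt m := by
  intro m
  induction m with
  | zero =>
    intro acc h
    rw [PySem.List.pyRange_one_eq_nil (by norm_num)]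
    simp [carsOf]
  | succ m ih =>
    intro acc h
    have hcast : ((m + 1 : Nat) : Int) = (m : Int) + 1 := by push_cast; ring
    rw [hcast, PySem.List.pyRange_one_succ_right (by positivity), List.foldl_append,
        ih acc (by omega)]
    simp only [List.foldl_cons, List.foldl_nil]
    rw [PySem.List.pyGetD_natCast clusterpt m []]
    rw [innerB (clusterpt.getD m []) (acc ++ carsOf clusterpt m)]
    rw [carsOf_succ clusterpt m (by omega), List.append_assoc]

theorem main_eq (clusterpt : List (List Int)) (kvalue : Int) (hpre : kvalue ≤ (clusterpt.length : Int)) :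
    carassignment clusterpt kvalue = carassignment_alt clusterpt kvalue := by
  unfold carassignment carassignment_alt
  by_cases hk : kvalue ≤ 0
  · rw [PySem.List.pyRange_one_eq_nil hk]
    simp
  · have hk0 : 0 ≤ kvalue := by omega
    have hkv : kvalue = ((kvalue.toNat : Nat) : Int) := by omega
    rw [hkv]
    have hA := outerA clusterpt kvalue.toNat [] (by omega)
    have hB := outerB clusterpt kvalue.toNat [] (by omega)
    show (((PySem.List.pyRange 0 ((kvalue.toNat : Nat) : Int) 1).foldl (fun st i =>
      (PySem.List.pyRange 0 (((PySem.List.pyGetD clusterpt i []).length : Nat) : Int) 1).foldl (fun st j =>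
        if PySem.Int.mod j 4 == 0 then
          ((st.1 ++ [([] : List Int)]).set (st.2 + 1).toNat
            ((st.1 ++ [([] : List Int)]).getD (st.2 + 1).toNat [] ++ [PySem.List.pyGetD (PySem.List.pyGetD clusterpt i []) j 0]), st.2 + 1)
        else
          (st.1.set st.2.toNat (st.1.getD st.2.toNat [] ++ [PySem.List.pyGetD (PySem.List.pyGetD clusterpt i []) j 0]), st.2)) st)
      (([] : List (List Int)), ((([] : List (List Int)).length : Int)) - 1)).1,
          ((PySem.List.pyRange 0 ((kvalue.toNat : Nat) : Int) 1).foldl (fun st i =>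
      (PySem.List.pyRange 0 (((PySem.List.pyGetD clusterpt i []).length : Nat) : Int) 1).foldl (fun st j =>
        if PySem.Int.mod j 4 == 0 then
          ((st.1 ++ [([] : List Int)]).set (st.2 + 1).toNat
            ((st.1 ++ [([] : List Int)]).getD (st.2 + 1).toNat [] ++ [PySem.List.pyGetD (PySem.List.pyGetD clusterpt i []) j 0]), st.2 + 1)
        else
          (st.1.set st.2.toNat (st.1.getD st.2.toNat [] ++ [PySem.List.pyGetD (PySem.List.pyGetD clusterpt i []) j 0]), st.2)) st)
      (([] : List (List Int)), ((([] : List (List Int)).length : Int)) - 1)).2 + 1)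
        = ((PySem.List.pyRange 0 ((kvalue.toNat : Nat) : Int) 1).foldl (fun acc i =>
      (PySem.List.pyRange 0 (((PySem.List.pyGetD clusterpt i []).length : Nat) : Int) 4).foldl
        (fun acc k => acc ++ [PySem.List.slice (PySem.List.pyGetD clusterpt i []) (some k) (some (k + 4))]) acc)
      ([] : List (List Int)),
           (((PySem.List.pyRange 0 ((kvalue.toNat : Nat) : Int) 1).foldl (fun acc i =>
      (PySem.List.pyRange 0 (((PySem.List.pyGetD clusterpt i []).length : Nat) : Int) 4).foldl
        (fun acc k => acc ++ [PySem.List.slice (PySem.List.pyGetD clusterpt i []) (some k) (some (k + 4))]) acc)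
      ([] : List (List Int))).length : Int))
    rw [hA, hB]
    simp

-- ===== VERDICT (by name: the statement is the Claim_ definition above) =====
theorem carassignment_spec : Claim_equal_carassignment := by
  intro clusterpt kvalue _ hpre
  unfold Spec_carassignment
  exact main_eq clusterpt kvalue hpre
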